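-- pv_equiv track=rewrite | github.com/puyanguvic/tokenizer_domain_special | experiments/common.py | detect_label_key
-- ===== SOURCE A (Python) =====
-- from typing import Any, Dict, Iterable, List, Mapping, Sequence, Tuple
--
-- def detect_label_key(example: Mapping[str, Any]) -> str:
--     """Heuristic label key detector across common security datasets."""
--     candidates = [
--         "label",
--         "labels",
--         "target",
--         "y",
--         "class",
--         "attack",
--         "is_attack",
--         "anomaly",
--         "is_anomaly",
--     ]
--     lower_map: Dict[str, str] = {str(k).lower(): str(k) for k in example.keys()}
--     for c in candidates:
--         if c in lower_map:
--             return lower_map[c]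
--     raise KeyError(
--         "Could not detect label key. Please pass --label-key explicitly. "
--         f"Available keys: {sorted(example.keys())}"
--     )
-- ===== SOURCE B (Python) =====
-- def detect_label_key(example):
--     """Heuristic label key detector across common security datasets.
--
--     Single pass over the keys: each key gets the priority rank of its
--     lowercased form among the candidates; keep the best-ranked key,
--     a later key overriding an equally ranked earlier one (so among
--     case-variants of the winning candidate the last key wins, the
--     Mapping shadowing rule)."""
--     candidates = [
--         "label",
--         "labels",
--         "target",
--         "y",
--         "class",
--         "attack",
--         "is_attack",
--         "anomaly",
--         "is_anomaly",
--     ]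
--     rank = {c: i for i, c in enumerate(candidates)}
--     best = None  # (rank, key)
--     for k in example.keys():
--         r = rank.get(str(k).lower())
--         if r is not None and (best is None or r <= best[0]):
--             best = (r, str(k))
--     if best is not None:
--         return best[1]
--     raise KeyError(
--         "Could not detect label key. Please pass --label-key explicitly. "
--         f"Available keys: {sorted(example.keys())}"
--     )
-- ===== Notes on version B (the rewrite author's own statement) =====
-- stated objective: alternative
-- what changed: B replaces A's candidate-priority loop over a pre-built lowercase map by a single pass over the keys that tracks the best-ranked (lowest candidate index) key, a later key overriding an equal rank so the last case-variant wins like A's dict comprehension.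
import Mathlib
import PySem

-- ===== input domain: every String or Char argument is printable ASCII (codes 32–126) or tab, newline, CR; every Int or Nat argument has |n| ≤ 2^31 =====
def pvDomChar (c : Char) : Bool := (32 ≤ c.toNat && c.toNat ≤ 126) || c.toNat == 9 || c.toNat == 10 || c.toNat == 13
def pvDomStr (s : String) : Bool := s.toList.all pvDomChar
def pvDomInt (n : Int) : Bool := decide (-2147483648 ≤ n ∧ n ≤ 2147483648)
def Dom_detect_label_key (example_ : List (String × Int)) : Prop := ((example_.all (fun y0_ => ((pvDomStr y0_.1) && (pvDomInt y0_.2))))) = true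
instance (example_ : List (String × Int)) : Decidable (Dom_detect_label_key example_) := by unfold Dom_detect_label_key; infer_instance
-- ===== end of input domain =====

-- B replaces A's candidate-priority loop over a pre-built lowercase map by a single pass over the keys that tracks the best-ranked match (later key wins a rank tie); objective: alternative decomposition, same result.


def dlk_candidates : List String :=
  ["label", "labels", "target", "y", "class", "attack", "is_attack", "anomaly", "is_anomaly"]

-- ===== PORT A =====
-- A's loop over candidates, looking each up in the pre-built lowercase map.
def dlk_loopA (m : PySem.Dict String String) : List String → String
  | [] => ""            -- Python raises KeyError here; excluded by Pre_
  | c :: cs => match m.get? c with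
      | some v => v
      | none => dlk_loopA m cs

def detect_label_key (example_ : List (String × Int)) : String :=
  let keys := (PySem.Dict.ofList example_).keys
  let lowerMap := keys.foldl (fun d k => d.insert (PySem.Str.lower k) k) PySem.Dict.empty
  dlk_loopA lowerMap dlk_candidates

-- ===== PORT B =====
-- B's rank dict {c: i for i, c in enumerate(candidates)} with .get: since the
-- candidates are distinct, the lookup is exactly first-index search.
def dlk_rank : List String → String → Option Nat
  | [], _ => none
  | c :: cs, x => if x = c then some 0 else (dlk_rank cs x).map (· + 1)

-- one step of B's key loop: update best = (rank, key) if this key's lowercase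
-- has a rank and it is ≤ the current best rank (later key wins a tie).
def dlk_step (cs : List String) (b : Option (Nat × String)) (k : String) : Option (Nat × String) :=
  match dlk_rank cs (PySem.Str.lower k) with
  | none => b
  | some r => match b with
      | none => some (r, k)
      | some (i, m) => if r ≤ i then some (r, k) else some (i, m)

def detect_label_key_alt (example_ : List (String × Int)) : String :=
  let keys := (PySem.Dict.ofList example_).keys
  match keys.foldl (dlk_step dlk_candidates) none with
  | some p => p.2
  | none => ""          -- Python raises KeyError here; excluded by Pre_

-- ===== PRECONDITION & SPEC =====
-- Pre_ excludes exactly the inputs on which Python A raises KeyError (no key lowercases to a candidate); B raises identically there.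
def Pre_detect_label_key (example_ : List (String × Int)) : Prop :=
  ∃ p ∈ example_, PySem.Str.lower p.1 ∈ dlk_candidates
instance (example_ : List (String × Int)) : Decidable (Pre_detect_label_key example_) := by unfold Pre_detect_label_key; infer_instance

def pvWitness_detect_label_key : (List (String × Int)) := [("Label", 1), ("x", 0)]

def Spec_detect_label_key (example_ : List (String × Int)) (out : String) : Prop := out = detect_label_key_alt example_
instance (example_ : List (String × Int)) (out : String) : Decidable (Spec_detect_label_key example_ out) := by unfold Spec_detect_label_key; infer_instance

-- ===== CLAIM (what is proved, stated in full; the proofs are below) =====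
def Claim_equal_detect_label_key : Prop := ∀ (example_ : List (String × Int)), Dom_detect_label_key example_ → Pre_detect_label_key example_ → Spec_detect_label_key example_ (detect_label_key example_)

-- ===== LEMMAS AND PROOFS =====

-- proof-side middle form: per-candidate last-wins scan of the keys
def dlk_scan (keys : List String) (c : String) : Option String :=
  keys.foldl (fun acc k => if PySem.Str.lower k = c then some k else acc) none

def dlk_loopB (keys : List String) : List String → String
  | [] => ""
  | c :: cs => match dlk_scan keys c with
      | some v => v
      | none => dlk_loopB keys cs

-- The lookup in A's fold-built lowercase map equals the last-wins scan.
lemma dlk_map_get_eq_scan (keys : List String) (c : String) (d : PySem.Dict String String) :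
    (keys.foldl (fun d k => d.insert (PySem.Str.lower k) k) d).get? c =
      keys.foldl (fun acc k => if PySem.Str.lower k = c then some k else acc) (d.get? c) := by
  induction keys generalizing d with
  | nil => rfl
  | cons k ks ih =>
      simp only [List.foldl_cons, ih]
      congr 1
      rw [PySem.Dict.get?_insert]
      by_cases h : PySem.Str.lower k = c
      · simp [h]
      · rw [if_neg (fun hc => h hc.symm), if_neg h]

lemma dlk_loopA_eq_loopB (keys : List String) (cs : List String) :
    dlk_loopA (keys.foldl (fun d k => d.insert (PySem.Str.lower k) k) PySem.Dict.empty) cs =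
      dlk_loopB keys cs := by
  induction cs with
  | nil => rfl
  | cons c cs ih =>
      simp only [dlk_loopA, dlk_loopB, ih]
      have h := dlk_map_get_eq_scan keys c PySem.Dict.empty
      have he : (PySem.Dict.empty : PySem.Dict String String).get? c = none := rfl
      rw [he] at h
      rw [h]
      rfl

-- the tie-update step commutes with shifting every rank by one
lemma dlk_step_shift (c : String) (cs : List String) (b : Option (Nat × String)) (k : String)
    (h : PySem.Str.lower k ≠ c) :
    dlk_step (c :: cs) (b.map (fun p => (p.1 + 1, p.2))) k =
      (dlk_step cs b k).map (fun p => (p.1 + 1, p.2)) := by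
  simp only [dlk_step, dlk_rank, if_neg h]
  cases hr : dlk_rank cs (PySem.Str.lower k) with
  | none => simp
  | some j =>
      cases b with
      | none => simp
      | some p =>
          obtain ⟨i, m⟩ := p
          simp only [Option.map_some]
          by_cases hji : j ≤ i
          · rw [if_pos hji, if_pos (by omega)]; simp
          · rw [if_neg hji, if_neg (by omega)]; simp

-- B's fold with candidate list (c :: cs): if some key lowercases to c, the result is
-- rank 0 with the LAST such key; otherwise it is the fold for cs with ranks shifted.
lemma dlk_fold_cons (c : String) (cs : List String) (K : List String) :
    K.foldl (dlk_step (c :: cs)) none =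
      match dlk_scan K c with
      | some m => some (0, m)
      | none => (K.foldl (dlk_step cs) none).map (fun p => (p.1 + 1, p.2)) := by
  induction K using List.reverseRecOn with
  | nil => rfl
  | append_singleton K k ih =>
      have hscan : dlk_scan (K ++ [k]) c =
          if PySem.Str.lower k = c then some k else dlk_scan K c := by
        simp [dlk_scan, List.foldl_append]
      rw [List.foldl_append, List.foldl_append, List.foldl_cons, List.foldl_nil,
        List.foldl_cons, List.foldl_nil, hscan, ih]
      by_cases hk : PySem.Str.lower k = c
      · rw [if_pos hk]
        cases hs : dlk_scan K c with
        | some m => simp [dlk_step, dlk_rank, hk]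
        | none =>
            simp only [dlk_step, dlk_rank, if_pos hk]
            cases K.foldl (dlk_step cs) none with
            | none => simp
            | some p => simp
      · rw [if_neg hk]
        cases hs : dlk_scan K c with
        | some m =>
            simp only [dlk_step, dlk_rank, if_neg hk]
            cases hr : dlk_rank cs (PySem.Str.lower k) with
            | none => simp
            | some j => simp
        | none => exact dlk_step_shift c cs _ k hk

lemma dlk_fold_nil (K : List String) :
    K.foldl (dlk_step ([] : List String)) none = none := by
  induction K using List.reverseRecOn with
  | nil => rfl
  | append_singleton K k ih => rw [List.foldl_append, List.foldl_cons, List.foldl_nil, ih]; rfl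

lemma dlk_loopB_eq_fold (cs : List String) (K : List String) :
    dlk_loopB K cs =
      match K.foldl (dlk_step cs) none with
      | some p => p.2
      | none => "" := by
  induction cs with
  | nil => simp [dlk_loopB, dlk_fold_nil]
  | cons c cs ih =>
      rw [dlk_fold_cons]
      simp only [dlk_loopB]
      cases hs : dlk_scan K c with
      | some m => rfl
      | none =>
          rw [ih]
          cases K.foldl (dlk_step cs) none with
          | none => rfl
          | some p => rfl

-- ===== VERDICT (by name: the statement is the Claim_ definition above) =====
theorem detect_label_key_spec : Claim_equal_detect_label_key := by
  intro example_ _ _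
  unfold Spec_detect_label_key detect_label_key detect_label_key_alt
  rw [dlk_loopA_eq_loopB, dlk_loopB_eq_fold]
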